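-- pv_equiv track=rewrite | github.com/Charldewet/TLC-PharmaSight | app/main.py | balance_insights_by_severity
-- ===== SOURCE A (Python) =====
-- def balance_insights_by_severity(insights: list, min_count: int = 3) -> list:
--     """Balance insights to prioritize showing at least one of each severity type
--
--     Returns insights ordered by: critical (red), warning (orange), positive (green)
--     Ensures at least one of each type is included if available.
--     Always returns at least min_count insights.
--     """
--     if not insights:
--         return []
--
--     # Separate insights by severity
--     critical_insights = [i for i in insights if i.get('severity') == 'critical']
--     warning_insights = [i for i in insights if i.get('severity') == 'warning']
--     positive_insights = [i for i in insights if i.get('severity') == 'positive']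
--     info_insights = [i for i in insights if i.get('severity') == 'info']
--
--     # Build balanced list: prioritize at least one of each type
--     balanced = []
--
--     # Add at least one critical if available
--     if critical_insights:
--         balanced.append(critical_insights[0])
--
--     # Add at least one warning if available
--     if warning_insights:
--         balanced.append(warning_insights[0])
--
--     # Add at least one positive if available
--     if positive_insights:
--         balanced.append(positive_insights[0])
--
--     # Add remaining insights in priority order (critical, warning, positive, info)
--     # Skip ones we've already added
--     remaining_critical = critical_insights[1:] if len(critical_insights) > 1 else []
--     remaining_warning = warning_insights[1:] if len(warning_insights) > 1 else []
--     remaining_positive = positive_insights[1:] if len(positive_insights) > 1 else []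
--
--     balanced.extend(remaining_critical)
--     balanced.extend(remaining_warning)
--     balanced.extend(remaining_positive)
--     balanced.extend(info_insights)
--
--     return balanced
-- ===== SOURCE B (Python) =====
-- def balance_insights_by_severity(insights: list, min_count: int = 3) -> list:
--     """One pass ranks each insight (first critical/warning/positive -> 0/1/2,
--     later ones -> 3/4/5, info -> 6, others dropped); one stable sort by rank."""
--     seen = set()
--     pairs = []
--     for item in insights:
--         sev = item.get('severity')
--         if sev == 'critical':
--             rank = 0
--         elif sev == 'warning':
--             rank = 1
--         elif sev == 'positive':
--             rank = 2
--         elif sev == 'info':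
--             rank = 6
--         else:
--             continue
--         if rank < 3:
--             if sev in seen:
--                 rank += 3
--             else:
--                 seen.add(sev)
--         pairs.append((rank, item))
--     return [item for _, item in sorted(pairs, key=lambda p: p[0])]
-- ===== Notes on version B (the rewrite author's own statement) =====
-- stated objective: alternative
-- what changed: Replaces four severity-filter passes plus piecewise head/rest assembly by a single pass that assigns each insight a numeric rank (first critical/warning/positive -> 0/1/2, repeats -> 3/4/5, info -> 6, others dropped) followed by one stable sort on the rank.
import Mathlib
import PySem

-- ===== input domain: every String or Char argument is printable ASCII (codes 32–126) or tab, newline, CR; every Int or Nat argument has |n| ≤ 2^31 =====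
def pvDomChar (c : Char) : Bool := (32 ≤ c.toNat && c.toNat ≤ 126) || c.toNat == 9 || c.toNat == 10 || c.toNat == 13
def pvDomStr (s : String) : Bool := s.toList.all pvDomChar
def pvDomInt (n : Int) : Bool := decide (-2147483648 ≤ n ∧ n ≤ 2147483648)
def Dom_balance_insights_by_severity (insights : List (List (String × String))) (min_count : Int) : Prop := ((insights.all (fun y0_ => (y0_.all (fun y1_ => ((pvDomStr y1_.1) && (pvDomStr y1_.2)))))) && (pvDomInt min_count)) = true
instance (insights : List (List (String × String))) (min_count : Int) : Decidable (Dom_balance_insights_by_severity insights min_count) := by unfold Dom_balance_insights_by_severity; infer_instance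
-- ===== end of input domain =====

-- B replaces A's four severity-filter passes and piecewise head/rest assembly by a single
-- ranking pass followed by one stable sort on the rank (objective: alternative; same values).


-- ===== PORT A =====
-- literal transliteration of A; `l.drop 1` is the slice l[1:], `l.headI` is l[0] under the guard
def balance_insights_by_severity (insights : List (List (String × String))) (min_count : Int) : List (List (String × String)) :=
  if insights = [] then []
  else
    let critical_insights := insights.filter (fun i => PySem.Dict.get? (PySem.Dict.mk i) "severity" == some "critical")
    let warning_insights := insights.filter (fun i => PySem.Dict.get? (PySem.Dict.mk i) "severity" == some "warning")
    let positive_insights := insights.filter (fun i => PySem.Dict.get? (PySem.Dict.mk i) "severity" == some "positive")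
    let info_insights := insights.filter (fun i => PySem.Dict.get? (PySem.Dict.mk i) "severity" == some "info")
    let balanced : List (List (String × String)) := []
    let balanced := if critical_insights.isEmpty then balanced else balanced ++ [critical_insights.headI]
    let balanced := if warning_insights.isEmpty then balanced else balanced ++ [warning_insights.headI]
    let balanced := if positive_insights.isEmpty then balanced else balanced ++ [positive_insights.headI]
    let remaining_critical := if 1 < critical_insights.length then critical_insights.drop 1 else []
    let remaining_warning := if 1 < warning_insights.length then warning_insights.drop 1 else []
    let remaining_positive := if 1 < positive_insights.length then positive_insights.drop 1 else []
    balanced ++ remaining_critical ++ remaining_warning ++ remaining_positive ++ info_insights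

-- ===== PORT B =====
-- the tail of Source B's loop body: record the ranked item and update (seen, pairs)
def bPut (st : PySem.Set String × List (Int × List (String × String))) (item : List (String × String))
    (sev : String) (rank : Int) : PySem.Set String × List (Int × List (String × String)) :=
  if rank < 3 then
    if PySem.Set.contains st.1 sev then (st.1, st.2 ++ [(rank + 3, item)])
    else (PySem.Set.add st.1 sev, st.2 ++ [(rank, item)])
  else (st.1, st.2 ++ [(rank, item)])

-- Source B's loop body: the elif chain picking the rank; `continue` = state unchanged
def bStep (st : PySem.Set String × List (Int × List (String × String))) (item : List (String × String)) :
    PySem.Set String × List (Int × List (String × String)) :=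
  match PySem.Dict.get? (PySem.Dict.mk item) "severity" with
  | none => st
  | some sev =>
    if sev = "critical" then bPut st item sev 0
    else if sev = "warning" then bPut st item sev 1
    else if sev = "positive" then bPut st item sev 2
    else if sev = "info" then bPut st item sev 6
    else st

def balance_insights_by_severity_alt (insights : List (List (String × String))) (min_count : Int) : List (List (String × String)) :=
  let st := insights.foldl bStep ((PySem.Set.empty : PySem.Set String), ([] : List (Int × List (String × String))))
  (PySem.List.sorted st.2 (fun p => p.1)).map (fun p => p.2)

-- ===== PRECONDITION & SPEC =====
def Spec_balance_insights_by_severity (insights : List (List (String × String))) (min_count : Int) (out : List (List (String × String))) : Prop := out = balance_insights_by_severity_alt insights min_count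
instance (insights : List (List (String × String))) (min_count : Int) (out : List (List (String × String))) : Decidable (Spec_balance_insights_by_severity insights min_count out) := by unfold Spec_balance_insights_by_severity; infer_instance

-- ===== CLAIM (what is proved, stated in full; the proofs are below) =====
def Claim_equal_balance_insights_by_severity : Prop := ∀ (insights : List (List (String × String))) (min_count : Int), Dom_balance_insights_by_severity insights min_count → Spec_balance_insights_by_severity insights min_count (balance_insights_by_severity insights min_count)

-- ===== LEMMAS AND PROOFS =====

def sevFilter (s : String) (xs : List (List (String × String))) : List (List (String × String)) :=
  xs.filter (fun i => PySem.Dict.get? (PySem.Dict.mk i) "severity" == some s)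

def seg (r : Int) (ps : List (Int × List (String × String))) : List (Int × List (String × String)) :=
  ps.filter (fun p => p.1 == r)

def bRun (xs : List (List (String × String))) : PySem.Set String × List (Int × List (String × String)) :=
  xs.foldl bStep ((PySem.Set.empty : PySem.Set String), ([] : List (Int × List (String × String))))

lemma seg_key {r : Int} {p : Int × List (String × String)} {ps : List (Int × List (String × String))}
    (h : p ∈ seg r ps) : p.1 = r := by
  have := (List.mem_filter.mp h).2
  simpa using this

lemma sevFilter_append_singleton (s : String) (xs : List (List (String × String))) (x : List (String × String)) :
    sevFilter s (xs ++ [x]) = sevFilter s xs ++ (if PySem.Dict.get? (PySem.Dict.mk x) "severity" == some s then [x] else []) := by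
  simp [sevFilter, List.filter_append, List.filter_cons]

lemma seg_append_singleton (r : Int) (ps : List (Int × List (String × String))) (p : Int × List (String × String)) :
    seg r (ps ++ [p]) = seg r ps ++ (if p.1 == r then [p] else []) := by
  simp [seg, List.filter_append, List.filter_cons]

lemma take_one_append_singleton {α : Type} (l : List α) (x : α) :
    (l ++ [x]).take 1 = if l = [] then [x] else l.take 1 := by
  cases l <;> simp

lemma insertBy_cons {α : Type} (before : α → α → Bool) (x y : α) (ys : List α) :
    PySem.List.insertBy before x (y :: ys) =
      if before x y then x :: y :: ys else y :: PySem.List.insertBy before x ys := rfl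

lemma insertBy_skip {α : Type} (before : α → α → Bool) (x : α) (A B : List α)
    (hA : ∀ a ∈ A, before x a = false) :
    PySem.List.insertBy before x (A ++ B) = A ++ PySem.List.insertBy before x B := by
  induction A with
  | nil => simp
  | cons a as ih =>
    have ha := hA a (by simp)
    have hrec := ih (fun b hb => hA b (by simp [hb]))
    simp [insertBy_cons, ha, hrec]

lemma insertBy_all {α : Type} (before : α → α → Bool) (x : α) (B : List α)
    (hB : ∀ b ∈ B, before x b = true) :
    PySem.List.insertBy before x B = x :: B := by
  cases B with
  | nil => rfl
  | cons b bs => simp [insertBy_cons, hB b (by simp)]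

lemma sorted_append_singleton {α : Type} (ps : List α) (x : α) (key : α → Int) :
    PySem.List.sorted (ps ++ [x]) key =
      PySem.List.insertBy (fun a b => decide (key a < key b)) x (PySem.List.sorted ps key) := by
  rw [PySem.List.sorted_eq_foldl_insertBy, PySem.List.sorted_eq_foldl_insertBy, List.foldl_append,
    List.foldl_cons, List.foldl_nil]

lemma sorted_seg (ps : List (Int × List (String × String)))
    (h : ∀ p ∈ ps, p.1 = 0 ∨ p.1 = 1 ∨ p.1 = 2 ∨ p.1 = 3 ∨ p.1 = 4 ∨ p.1 = 5 ∨ p.1 = 6) :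
    PySem.List.sorted ps (fun p => p.1) =
      seg 0 ps ++ (seg 1 ps ++ (seg 2 ps ++ (seg 3 ps ++ (seg 4 ps ++ (seg 5 ps ++ seg 6 ps))))) := by
  induction ps using List.reverseRecOn with
  | nil => simp [seg, PySem.List.sorted_eq_foldl_insertBy]
  | append_singleton ps x ih =>
    have hps : ∀ p ∈ ps, p.1 = 0 ∨ p.1 = 1 ∨ p.1 = 2 ∨ p.1 = 3 ∨ p.1 = 4 ∨ p.1 = 5 ∨ p.1 = 6 :=
      fun p hp => h p (by simp [hp])
    have hlo : ∀ (j r : Int), x.1 = r → j ≤ r →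
        ∀ a ∈ seg j ps, (fun a b => decide ((fun p : Int × List (String × String) => p.1) a <
          (fun p : Int × List (String × String) => p.1) b)) x a = false := by
      intro j r hr hj a ha
      have hk := seg_key ha
      simp only [decide_eq_false_iff_not, hr, hk]
      omega
    have hhi : ∀ (j r : Int), x.1 = r → r < j →
        ∀ a ∈ seg j ps, (fun a b => decide ((fun p : Int × List (String × String) => p.1) a <
          (fun p : Int × List (String × String) => p.1) b)) x a = true := by
      intro j r hr hj a ha
      have hk := seg_key ha
      simp only [decide_eq_true_eq, hr, hk]
      omega
    rw [sorted_append_singleton, ih hps]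
    rcases h x (by simp) with hx | hx | hx | hx | hx | hx | hx
    · rw [insertBy_skip _ _ (seg 0 ps) _ (hlo 0 0 hx le_rfl),
        insertBy_all _ _ _ (by
          intro b hb
          simp only [List.mem_append] at hb
          rcases hb with hb | hb | hb | hb | hb | hb
          exacts [hhi 1 0 hx (by norm_num) b hb, hhi 2 0 hx (by norm_num) b hb,
            hhi 3 0 hx (by norm_num) b hb, hhi 4 0 hx (by norm_num) b hb,
            hhi 5 0 hx (by norm_num) b hb, hhi 6 0 hx (by norm_num) b hb])]
      simp [seg_append_singleton, hx]
    · rw [insertBy_skip _ _ (seg 0 ps) _ (hlo 0 1 hx (by norm_num)),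
        insertBy_skip _ _ (seg 1 ps) _ (hlo 1 1 hx le_rfl),
        insertBy_all _ _ _ (by
          intro b hb
          simp only [List.mem_append] at hb
          rcases hb with hb | hb | hb | hb | hb
          exacts [hhi 2 1 hx (by norm_num) b hb, hhi 3 1 hx (by norm_num) b hb,
            hhi 4 1 hx (by norm_num) b hb, hhi 5 1 hx (by norm_num) b hb,
            hhi 6 1 hx (by norm_num) b hb])]
      simp [seg_append_singleton, hx]
    · rw [insertBy_skip _ _ (seg 0 ps) _ (hlo 0 2 hx (by norm_num)),
        insertBy_skip _ _ (seg 1 ps) _ (hlo 1 2 hx (by norm_num)),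
        insertBy_skip _ _ (seg 2 ps) _ (hlo 2 2 hx le_rfl),
        insertBy_all _ _ _ (by
          intro b hb
          simp only [List.mem_append] at hb
          rcases hb with hb | hb | hb | hb
          exacts [hhi 3 2 hx (by norm_num) b hb, hhi 4 2 hx (by norm_num) b hb,
            hhi 5 2 hx (by norm_num) b hb, hhi 6 2 hx (by norm_num) b hb])]
      simp [seg_append_singleton, hx]
    · rw [insertBy_skip _ _ (seg 0 ps) _ (hlo 0 3 hx (by norm_num)),
        insertBy_skip _ _ (seg 1 ps) _ (hlo 1 3 hx (by norm_num)),
        insertBy_skip _ _ (seg 2 ps) _ (hlo 2 3 hx (by norm_num)),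
        insertBy_skip _ _ (seg 3 ps) _ (hlo 3 3 hx le_rfl),
        insertBy_all _ _ _ (by
          intro b hb
          simp only [List.mem_append] at hb
          rcases hb with hb | hb | hb
          exacts [hhi 4 3 hx (by norm_num) b hb, hhi 5 3 hx (by norm_num) b hb,
            hhi 6 3 hx (by norm_num) b hb])]
      simp [seg_append_singleton, hx]
    · rw [insertBy_skip _ _ (seg 0 ps) _ (hlo 0 4 hx (by norm_num)),
        insertBy_skip _ _ (seg 1 ps) _ (hlo 1 4 hx (by norm_num)),
        insertBy_skip _ _ (seg 2 ps) _ (hlo 2 4 hx (by norm_num)),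
        insertBy_skip _ _ (seg 3 ps) _ (hlo 3 4 hx (by norm_num)),
        insertBy_skip _ _ (seg 4 ps) _ (hlo 4 4 hx le_rfl),
        insertBy_all _ _ _ (by
          intro b hb
          simp only [List.mem_append] at hb
          rcases hb with hb | hb
          exacts [hhi 5 4 hx (by norm_num) b hb, hhi 6 4 hx (by norm_num) b hb])]
      simp [seg_append_singleton, hx]
    · rw [insertBy_skip _ _ (seg 0 ps) _ (hlo 0 5 hx (by norm_num)),
        insertBy_skip _ _ (seg 1 ps) _ (hlo 1 5 hx (by norm_num)),
        insertBy_skip _ _ (seg 2 ps) _ (hlo 2 5 hx (by norm_num)),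
        insertBy_skip _ _ (seg 3 ps) _ (hlo 3 5 hx (by norm_num)),
        insertBy_skip _ _ (seg 4 ps) _ (hlo 4 5 hx (by norm_num)),
        insertBy_skip _ _ (seg 5 ps) _ (hlo 5 5 hx le_rfl),
        insertBy_all _ _ _ (fun b hb => hhi 6 5 hx (by norm_num) b hb)]
      simp [seg_append_singleton, hx]
    · rw [insertBy_skip _ _ (seg 0 ps) _ (hlo 0 6 hx (by norm_num)),
        insertBy_skip _ _ (seg 1 ps) _ (hlo 1 6 hx (by norm_num)),
        insertBy_skip _ _ (seg 2 ps) _ (hlo 2 6 hx (by norm_num)),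
        insertBy_skip _ _ (seg 3 ps) _ (hlo 3 6 hx (by norm_num)),
        insertBy_skip _ _ (seg 4 ps) _ (hlo 4 6 hx (by norm_num)),
        insertBy_skip _ _ (seg 5 ps) _ (hlo 5 6 hx (by norm_num)),
        PySem.List.insertBy_of_forall_not_before _ _ _ (fun a ha => hlo 6 6 hx le_rfl a ha)]
      simp [seg_append_singleton, hx]

lemma bPut_lt_mem (st : PySem.Set String × List (Int × List (String × String)))
    (item : List (String × String)) (sev : String) (r : Int) (hr : r < 3) (h : sev ∈ st.1) :
    bPut st item sev r = (st.1, st.2 ++ [(r + 3, item)]) := by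
  simp [bPut, hr, h]

lemma bPut_lt_not_mem (st : PySem.Set String × List (Int × List (String × String)))
    (item : List (String × String)) (sev : String) (r : Int) (hr : r < 3) (h : sev ∉ st.1) :
    bPut st item sev r = (PySem.Set.add st.1 sev, st.2 ++ [(r, item)]) := by
  simp [bPut, hr, h]

lemma bPut_ge (st : PySem.Set String × List (Int × List (String × String)))
    (item : List (String × String)) (sev : String) (r : Int) (hr : ¬ r < 3) :
    bPut st item sev r = (st.1, st.2 ++ [(r, item)]) := by
  simp [bPut, hr]

lemma bStep_of_get {st : PySem.Set String × List (Int × List (String × String))}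
    {x : List (String × String)} {s : String} (h : PySem.Dict.get? (PySem.Dict.mk x) "severity" = some s) :
    bStep st x = (if s = "critical" then bPut st x s 0 else if s = "warning" then bPut st x s 1
      else if s = "positive" then bPut st x s 2 else if s = "info" then bPut st x s 6 else st) := by
  simp [bStep, h]

lemma bRun_append (xs : List (List (String × String))) (x : List (String × String)) :
    bRun (xs ++ [x]) = bStep (bRun xs) x := by
  simp [bRun, List.foldl_append]

lemma bInv (xs : List (List (String × String))) :
    (("critical" ∈ (bRun xs).1) ↔ sevFilter "critical" xs ≠ []) ∧
    (("warning" ∈ (bRun xs).1) ↔ sevFilter "warning" xs ≠ []) ∧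
    (("positive" ∈ (bRun xs).1) ↔ sevFilter "positive" xs ≠ []) ∧
    seg 0 (bRun xs).2 = ((sevFilter "critical" xs).take 1).map (fun i => ((0 : Int), i)) ∧
    seg 1 (bRun xs).2 = ((sevFilter "warning" xs).take 1).map (fun i => ((1 : Int), i)) ∧
    seg 2 (bRun xs).2 = ((sevFilter "positive" xs).take 1).map (fun i => ((2 : Int), i)) ∧
    seg 3 (bRun xs).2 = ((sevFilter "critical" xs).drop 1).map (fun i => ((3 : Int), i)) ∧
    seg 4 (bRun xs).2 = ((sevFilter "warning" xs).drop 1).map (fun i => ((4 : Int), i)) ∧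
    seg 5 (bRun xs).2 = ((sevFilter "positive" xs).drop 1).map (fun i => ((5 : Int), i)) ∧
    seg 6 (bRun xs).2 = (sevFilter "info" xs).map (fun i => ((6 : Int), i)) ∧
    (∀ p ∈ (bRun xs).2, p.1 = 0 ∨ p.1 = 1 ∨ p.1 = 2 ∨ p.1 = 3 ∨ p.1 = 4 ∨ p.1 = 5 ∨ p.1 = 6) := by
  induction xs using List.reverseRecOn with
  | nil =>
    refine ⟨?_, ?_, ?_, ?_, ?_, ?_, ?_, ?_, ?_, ?_, ?_⟩ <;>
      simp [bRun, sevFilter, seg, PySem.Set.empty]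
  | append_singleton xs x ih =>
    obtain ⟨h1, h2, h3, e0, e1, e2, e3, e4, e5, e6, hr⟩ := ih
    rw [bRun_append]
    rcases hs : PySem.Dict.get? (PySem.Dict.mk x) "severity" with _ | s
    · have hstep : bStep (bRun xs) x = bRun xs := by simp [bStep, hs]
      rw [hstep]
      refine ⟨?_, ?_, ?_, ?_, ?_, ?_, ?_, ?_, ?_, ?_, hr⟩ <;>
        simp [sevFilter_append_singleton, hs, h1, h2, h3, e0, e1, e2, e3, e4, e5, e6]
    · rw [bStep_of_get hs]
      by_cases hc : s = "critical"
      · subst hc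
        rw [if_pos rfl]
        by_cases hm : "critical" ∈ (bRun xs).1
        · rw [bPut_lt_mem _ _ _ _ (by norm_num) hm]
          have hne : sevFilter "critical" xs ≠ [] := h1.mp hm
          refine ⟨?_, ?_, ?_, ?_, ?_, ?_, ?_, ?_, ?_, ?_, ?_⟩
          · simp [sevFilter_append_singleton, hs, hm]
          · simp [sevFilter_append_singleton, hs, h2]
          · simp [sevFilter_append_singleton, hs, h3]
          · simp [seg_append_singleton, sevFilter_append_singleton, hs, take_one_append_singleton, hne, e0]
          · simp [seg_append_singleton, sevFilter_append_singleton, hs, e1]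
          · simp [seg_append_singleton, sevFilter_append_singleton, hs, e2]
          · simp [seg_append_singleton, sevFilter_append_singleton, hs, hne, e3]
          · simp [seg_append_singleton, sevFilter_append_singleton, hs, e4]
          · simp [seg_append_singleton, sevFilter_append_singleton, hs, e5]
          · simp [seg_append_singleton, sevFilter_append_singleton, hs, e6]
          · intro p hp
            rcases List.mem_append.mp hp with hp | hp
            · exact hr p hp
            · have hp' : p = ((3 : Int), x) := by simpa using hp
              rw [hp']; norm_num
        · rw [bPut_lt_not_mem _ _ _ _ (by norm_num) hm]
          have hnil : sevFilter "critical" xs = [] := by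
            by_contra hne; exact hm (h1.mpr hne)
          refine ⟨?_, ?_, ?_, ?_, ?_, ?_, ?_, ?_, ?_, ?_, ?_⟩
          · simp [sevFilter_append_singleton, hs, PySem.Set.mem_add]
          · simp [sevFilter_append_singleton, hs, PySem.Set.mem_add, h2]
          · simp [sevFilter_append_singleton, hs, PySem.Set.mem_add, h3]
          · simp [seg_append_singleton, sevFilter_append_singleton, hs, hnil, e0]
          · simp [seg_append_singleton, sevFilter_append_singleton, hs, e1]
          · simp [seg_append_singleton, sevFilter_append_singleton, hs, e2]
          · simp [seg_append_singleton, sevFilter_append_singleton, hs, hnil, e3]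
          · simp [seg_append_singleton, sevFilter_append_singleton, hs, e4]
          · simp [seg_append_singleton, sevFilter_append_singleton, hs, e5]
          · simp [seg_append_singleton, sevFilter_append_singleton, hs, e6]
          · intro p hp
            rcases List.mem_append.mp hp with hp | hp
            · exact hr p hp
            · have hp' : p = ((0 : Int), x) := by simpa using hp
              rw [hp']; norm_num
      · by_cases hw : s = "warning"
        · subst hw
          rw [if_neg (by decide), if_pos rfl]
          by_cases hm : "warning" ∈ (bRun xs).1
          · rw [bPut_lt_mem _ _ _ _ (by norm_num) hm]
            have hne : sevFilter "warning" xs ≠ [] := h2.mp hm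
            refine ⟨?_, ?_, ?_, ?_, ?_, ?_, ?_, ?_, ?_, ?_, ?_⟩
            · simp [sevFilter_append_singleton, hs, h1]
            · simp [sevFilter_append_singleton, hs, hm]
            · simp [sevFilter_append_singleton, hs, h3]
            · simp [seg_append_singleton, sevFilter_append_singleton, hs, e0]
            · simp [seg_append_singleton, sevFilter_append_singleton, hs, take_one_append_singleton, hne, e1]
            · simp [seg_append_singleton, sevFilter_append_singleton, hs, e2]
            · simp [seg_append_singleton, sevFilter_append_singleton, hs, e3]
            · simp [seg_append_singleton, sevFilter_append_singleton, hs, hne, e4]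
            · simp [seg_append_singleton, sevFilter_append_singleton, hs, e5]
            · simp [seg_append_singleton, sevFilter_append_singleton, hs, e6]
            · intro p hp
              rcases List.mem_append.mp hp with hp | hp
              · exact hr p hp
              · have hp' : p = ((4 : Int), x) := by simpa using hp
                rw [hp']; norm_num
          · rw [bPut_lt_not_mem _ _ _ _ (by norm_num) hm]
            have hnil : sevFilter "warning" xs = [] := by
              by_contra hne; exact hm (h2.mpr hne)
            refine ⟨?_, ?_, ?_, ?_, ?_, ?_, ?_, ?_, ?_, ?_, ?_⟩
            · simp [sevFilter_append_singleton, hs, PySem.Set.mem_add, h1]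
            · simp [sevFilter_append_singleton, hs, PySem.Set.mem_add]
            · simp [sevFilter_append_singleton, hs, PySem.Set.mem_add, h3]
            · simp [seg_append_singleton, sevFilter_append_singleton, hs, e0]
            · simp [seg_append_singleton, sevFilter_append_singleton, hs, hnil, e1]
            · simp [seg_append_singleton, sevFilter_append_singleton, hs, e2]
            · simp [seg_append_singleton, sevFilter_append_singleton, hs, e3]
            · simp [seg_append_singleton, sevFilter_append_singleton, hs, hnil, e4]
            · simp [seg_append_singleton, sevFilter_append_singleton, hs, e5]
            · simp [seg_append_singleton, sevFilter_append_singleton, hs, e6]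
            · intro p hp
              rcases List.mem_append.mp hp with hp | hp
              · exact hr p hp
              · have hp' : p = ((1 : Int), x) := by simpa using hp
                rw [hp']; norm_num
        · by_cases hp2 : s = "positive"
          · subst hp2
            rw [if_neg (by decide), if_neg (by decide), if_pos rfl]
            by_cases hm : "positive" ∈ (bRun xs).1
            · rw [bPut_lt_mem _ _ _ _ (by norm_num) hm]
              have hne : sevFilter "positive" xs ≠ [] := h3.mp hm
              refine ⟨?_, ?_, ?_, ?_, ?_, ?_, ?_, ?_, ?_, ?_, ?_⟩
              · simp [sevFilter_append_singleton, hs, h1]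
              · simp [sevFilter_append_singleton, hs, h2]
              · simp [sevFilter_append_singleton, hs, hm]
              · simp [seg_append_singleton, sevFilter_append_singleton, hs, e0]
              · simp [seg_append_singleton, sevFilter_append_singleton, hs, e1]
              · simp [seg_append_singleton, sevFilter_append_singleton, hs, take_one_append_singleton, hne, e2]
              · simp [seg_append_singleton, sevFilter_append_singleton, hs, e3]
              · simp [seg_append_singleton, sevFilter_append_singleton, hs, e4]
              · simp [seg_append_singleton, sevFilter_append_singleton, hs, hne, e5]
              · simp [seg_append_singleton, sevFilter_append_singleton, hs, e6]
              · intro p hp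
                rcases List.mem_append.mp hp with hp | hp
                · exact hr p hp
                · have hp' : p = ((5 : Int), x) := by simpa using hp
                  rw [hp']; norm_num
            · rw [bPut_lt_not_mem _ _ _ _ (by norm_num) hm]
              have hnil : sevFilter "positive" xs = [] := by
                by_contra hne; exact hm (h3.mpr hne)
              refine ⟨?_, ?_, ?_, ?_, ?_, ?_, ?_, ?_, ?_, ?_, ?_⟩
              · simp [sevFilter_append_singleton, hs, PySem.Set.mem_add, h1]
              · simp [sevFilter_append_singleton, hs, PySem.Set.mem_add, h2]
              · simp [sevFilter_append_singleton, hs, PySem.Set.mem_add]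
              · simp [seg_append_singleton, sevFilter_append_singleton, hs, e0]
              · simp [seg_append_singleton, sevFilter_append_singleton, hs, e1]
              · simp [seg_append_singleton, sevFilter_append_singleton, hs, hnil, e2]
              · simp [seg_append_singleton, sevFilter_append_singleton, hs, e3]
              · simp [seg_append_singleton, sevFilter_append_singleton, hs, e4]
              · simp [seg_append_singleton, sevFilter_append_singleton, hs, hnil, e5]
              · simp [seg_append_singleton, sevFilter_append_singleton, hs, e6]
              · intro p hp
                rcases List.mem_append.mp hp with hp | hp
                · exact hr p hp
                · have hp' : p = ((2 : Int), x) := by simpa using hp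
                  rw [hp']; norm_num
          · by_cases hi : s = "info"
            · subst hi
              rw [if_neg (by decide), if_neg (by decide), if_neg (by decide), if_pos rfl,
                bPut_ge _ _ _ _ (by norm_num)]
              refine ⟨?_, ?_, ?_, ?_, ?_, ?_, ?_, ?_, ?_, ?_, ?_⟩
              · simp [sevFilter_append_singleton, hs, h1]
              · simp [sevFilter_append_singleton, hs, h2]
              · simp [sevFilter_append_singleton, hs, h3]
              · simp [seg_append_singleton, sevFilter_append_singleton, hs, e0]
              · simp [seg_append_singleton, sevFilter_append_singleton, hs, e1]
              · simp [seg_append_singleton, sevFilter_append_singleton, hs, e2]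
              · simp [seg_append_singleton, sevFilter_append_singleton, hs, e3]
              · simp [seg_append_singleton, sevFilter_append_singleton, hs, e4]
              · simp [seg_append_singleton, sevFilter_append_singleton, hs, e5]
              · simp [seg_append_singleton, sevFilter_append_singleton, hs, e6]
              · intro p hp
                rcases List.mem_append.mp hp with hp | hp
                · exact hr p hp
                · have hp' : p = ((6 : Int), x) := by simpa using hp
                  rw [hp']; norm_num
            · rw [if_neg hc, if_neg hw, if_neg hp2, if_neg hi]
              refine ⟨?_, ?_, ?_, ?_, ?_, ?_, ?_, ?_, ?_, ?_, hr⟩ <;>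
                simp [sevFilter_append_singleton, hs, hc, hw, hp2, hi, h1, h2, h3,
                  e0, e1, e2, e3, e4, e5, e6]

lemma if_empty_append {α : Type} [Inhabited α] (b l : List α) :
    (if l.isEmpty then b else b ++ [l.headI]) = b ++ l.take 1 := by
  cases l <;> simp

lemma drop_guard {α : Type} (l : List α) : (if 1 < l.length then l.drop 1 else []) = l.drop 1 := by
  match l with
  | [] => simp
  | [a] => simp
  | a :: b :: t => rw [if_pos (by simp)]

lemma A_eq (insights : List (List (String × String))) (mc : Int) :
    balance_insights_by_severity insights mc =
      (sevFilter "critical" insights).take 1 ++ ((sevFilter "warning" insights).take 1 ++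
      ((sevFilter "positive" insights).take 1 ++ ((sevFilter "critical" insights).drop 1 ++
      ((sevFilter "warning" insights).drop 1 ++ ((sevFilter "positive" insights).drop 1 ++
      sevFilter "info" insights))))) := by
  by_cases h : insights = []
  · simp [balance_insights_by_severity, h, sevFilter]
  · simp only [balance_insights_by_severity, if_empty_append, drop_guard]
    simp [h, sevFilter, List.append_assoc]

lemma B_eq (insights : List (List (String × String))) (mc : Int) :
    balance_insights_by_severity_alt insights mc =
      (sevFilter "critical" insights).take 1 ++ ((sevFilter "warning" insights).take 1 ++
      ((sevFilter "positive" insights).take 1 ++ ((sevFilter "critical" insights).drop 1 ++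
      ((sevFilter "warning" insights).drop 1 ++ ((sevFilter "positive" insights).drop 1 ++
      sevFilter "info" insights))))) := by
  obtain ⟨_, _, _, e0, e1, e2, e3, e4, e5, e6, hr⟩ := bInv insights
  have halt : balance_insights_by_severity_alt insights mc =
      (PySem.List.sorted (bRun insights).2 (fun p => p.1)).map (fun p => p.2) := rfl
  rw [halt, sorted_seg _ hr, e0, e1, e2, e3, e4, e5, e6]
  simp [List.map_map]

-- ===== VERDICT (by name: the statement is the Claim_ definition above) =====
theorem balance_insights_by_severity_spec : Claim_equal_balance_insights_by_severity := by
  intro insights mc _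
  unfold Spec_balance_insights_by_severity
  rw [A_eq, B_eq]
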